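-- pv_equiv track=rewrite | github.com/sibyllinesoft/valknut | tests/cli-e2e-tests/fixtures/test-repos/performance-test/src/complex_algorithms.py | memory_intensive_operation
-- ===== SOURCE A (Python) =====
-- from typing import List, Dict, Any
--
-- def memory_intensive_operation(size: int) -> List[List[int]]:
--     """Memory-intensive operation for resource testing."""
--     matrix = []
--     for i in range(size):
--         row = []
--         for j in range(size):
--             # Complex calculation to stress both CPU and memory
--             value = (i * j) % 1000
--             if value % 2 == 0:
--                 value = value ** 2
--             else:
--                 value = value * 3 + 1
--             row.append(value)
--         matrix.append(row)
--
--     return matrix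
-- ===== SOURCE B (Python) =====
-- def memory_intensive_operation(size):
--     # Triangular construction exploiting symmetry (i*j == j*i): for row i, the
--     # first i cells are mirrored from already-built rows (matrix[j][i]); the
--     # remaining cells are produced by stepping the residue additively
--     # (r -> (r + i) % 1000 starting at (i*i) % 1000), so no per-cell
--     # multiplication or modulus of a product is performed.
--     matrix = []
--     for i in range(size):
--         row = [matrix[j][i] for j in range(i)]
--         r = (i * i) % 1000
--         for j in range(i, size):
--             row.append(r * r if r % 2 == 0 else r * 3 + 1)
--             r = (r + i) % 1000
--         matrix.append(row)
--     return matrix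
-- ===== Notes on version B (the rewrite author's own statement) =====
-- stated objective: alternative
-- what changed: B builds the matrix triangularly: each row's head (j < i) is mirrored from already-built rows using the symmetry of the product i*j, and only the tail (j >= i) is computed, stepping the residue additively by i instead of recomputing the product's residue per cell.
import Mathlib
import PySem

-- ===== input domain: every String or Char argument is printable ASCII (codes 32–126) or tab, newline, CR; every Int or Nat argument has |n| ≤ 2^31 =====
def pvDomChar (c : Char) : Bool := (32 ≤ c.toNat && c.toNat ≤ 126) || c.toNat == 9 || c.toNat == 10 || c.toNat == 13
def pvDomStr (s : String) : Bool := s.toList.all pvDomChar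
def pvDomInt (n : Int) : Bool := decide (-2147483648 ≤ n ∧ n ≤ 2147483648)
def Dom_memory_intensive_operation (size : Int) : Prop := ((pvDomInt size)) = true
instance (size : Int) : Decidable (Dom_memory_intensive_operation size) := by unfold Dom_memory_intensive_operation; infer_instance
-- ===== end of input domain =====

-- B fills only each row's tail (j ≥ i), stepping the residue additively, and mirrors the
-- head from earlier rows by symmetry (i*j = j*i); an alternative of the same O(n^2) cost.

-- ===== PORT A =====
def memory_intensive_operation (size : Int) : List (List Int) :=
  (PySem.List.pyRange 0 size 1).foldl (fun matrix i =>
    matrix ++ [(PySem.List.pyRange 0 size 1).foldl (fun row j =>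
      let value := PySem.Int.mod (i * j) 1000
      let value := if PySem.Int.mod value 2 = 0 then value ^ 2 else value * 3 + 1
      row ++ [value]) []]) []

-- ===== PORT B =====
-- matrix[j][i] is ported with pyGetD: both indices are always in range here
-- (j < i rows are complete with `size` cells and i < size), so Python never raises.
def memory_intensive_operation_alt (size : Int) : List (List Int) :=
  (PySem.List.pyRange 0 size 1).foldl (fun matrix i =>
    matrix ++ [((PySem.List.pyRange i size 1).foldl
        (fun (st : List Int × Int) _j =>
          (st.1 ++ [if PySem.Int.mod st.2 2 = 0 then st.2 * st.2 else st.2 * 3 + 1],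
           PySem.Int.mod (st.2 + i) 1000))
        ((PySem.List.pyRange 0 i 1).map (fun j =>
          PySem.List.pyGetD (PySem.List.pyGetD matrix j []) i 0),
         PySem.Int.mod (i * i) 1000)).1]) []

-- ===== PRECONDITION & SPEC =====
def Spec_memory_intensive_operation (size : Int) (out : List (List Int)) : Prop := out = memory_intensive_operation_alt size
instance (size : Int) (out : List (List Int)) : Decidable (Spec_memory_intensive_operation size out) := by unfold Spec_memory_intensive_operation; infer_instance

-- ===== CLAIM (what is proved, stated in full; the proofs are below) =====
def Claim_equal_memory_intensive_operation : Prop := ∀ (size : Int), Dom_memory_intensive_operation size → Spec_memory_intensive_operation size (memory_intensive_operation size)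

-- ===== LEMMAS AND PROOFS =====

-- the per-residue transform, and the fully evaluated row i of the intended matrix
def pvF (r : Int) : Int := if PySem.Int.mod r 2 = 0 then r * r else r * 3 + 1
def pvRow (n i : Int) : List Int :=
  (PySem.List.pyRange 0 n 1).map (fun j => pvF (PySem.Int.mod (i * j) 1000))

theorem pvA_eq_map (size : Int) :
    memory_intensive_operation size = (PySem.List.pyRange 0 size 1).map (pvRow size) := by
  unfold memory_intensive_operation
  rw [PySem.List.foldl_append_singleton_eq_map]
  simp only [List.nil_append]
  refine List.map_congr_left (fun i _ => ?_)
  rw [PySem.List.foldl_append_singleton_eq_map]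
  simp only [List.nil_append, pvRow]
  exact List.map_congr_left (fun j _ => by simp only [pvF, pow_two])

-- additive residue stepping agrees with the direct product residue
theorem pvStep (i a : Int) :
    PySem.Int.mod (PySem.Int.mod (i * a) 1000 + i) 1000 = PySem.Int.mod (i * (a + 1)) 1000 := by
  rw [PySem.Int.mod_eq_emod_of_pos (h := by omega),
      PySem.Int.mod_eq_emod_of_pos (h := by omega),
      PySem.Int.mod_eq_emod_of_pos (h := by omega)]
  have h : i * (a + 1) = i * a + i := by ring
  rw [h]
  generalize i * a = x
  omega

-- the inner loop appends the tail of row i, carrying the residue additively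
theorem pvTail (i n : Int) : ∀ (k : Nat) (a : Int) (row0 : List Int), n - a = (k : Int) →
    (PySem.List.pyRange a n 1).foldl
      (fun (st : List Int × Int) _j =>
        (st.1 ++ [if PySem.Int.mod st.2 2 = 0 then st.2 * st.2 else st.2 * 3 + 1],
         PySem.Int.mod (st.2 + i) 1000))
      (row0, PySem.Int.mod (i * a) 1000)
    = (row0 ++ (PySem.List.pyRange a n 1).map (fun j => pvF (PySem.Int.mod (i * j) 1000)),
       PySem.Int.mod (i * n) 1000) := by
  intro k
  induction k with
  | zero =>
    intro a row0 h
    have hna : n = a := by omega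
    subst hna
    rw [PySem.List.pyRange_one_eq_nil (h := le_refl n)]
    simp
  | succ k ih =>
    intro a row0 h
    have ha : a < n := by omega
    rw [PySem.List.pyRange_one_cons (h := ha)]
    simp only [List.foldl_cons, List.map_cons]
    rw [pvStep i a]
    rw [ih (a + 1) (row0 ++ [if PySem.Int.mod (PySem.Int.mod (i * a) 1000) 2 = 0
          then PySem.Int.mod (i * a) 1000 * PySem.Int.mod (i * a) 1000
          else PySem.Int.mod (i * a) 1000 * 3 + 1]) (by omega)]
    simp [pvF, List.append_assoc]

-- the outer loop builds exactly the first m intended rows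
theorem pvOuter (size : Int) : ∀ (m : Nat), (m : Int) ≤ size →
    (PySem.List.pyRange 0 (m : Int) 1).foldl (fun matrix i =>
      matrix ++ [((PySem.List.pyRange i size 1).foldl
          (fun (st : List Int × Int) _j =>
            (st.1 ++ [if PySem.Int.mod st.2 2 = 0 then st.2 * st.2 else st.2 * 3 + 1],
             PySem.Int.mod (st.2 + i) 1000))
          ((PySem.List.pyRange 0 i 1).map (fun j =>
            PySem.List.pyGetD (PySem.List.pyGetD matrix j []) i 0),
           PySem.Int.mod (i * i) 1000)).1]) []
    = (PySem.List.pyRange 0 (m : Int) 1).map (pvRow size) := by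
  intro m
  induction m with
  | zero => intro _; simp [PySem.List.pyRange_one_eq_nil]
  | succ m ih =>
    intro h
    have hm : (m : Int) ≤ size := by push_cast at h ⊢; omega
    have hms : (m : Int) < size := by push_cast at h ⊢; omega
    have hcast : ((m + 1 : Nat) : Int) = (m : Int) + 1 := by push_cast; ring
    rw [hcast, PySem.List.pyRange_one_succ_right (h := by positivity),
        List.foldl_append, List.map_append, ih hm]
    simp only [List.foldl_cons, List.foldl_nil, List.map_cons, List.map_nil]
    congr 1
    -- the freshly built row equals pvRow size m
    have hmirror : (PySem.List.pyRange 0 (m : Int) 1).map (fun j =>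
        PySem.List.pyGetD (PySem.List.pyGetD ((PySem.List.pyRange 0 (m : Int) 1).map (pvRow size)) j []) (m : Int) 0)
        = (PySem.List.pyRange 0 (m : Int) 1).map (fun j => pvF (PySem.Int.mod ((m : Int) * j) 1000)) := by
      refine List.map_congr_left (fun j hj => ?_)
      rw [PySem.List.mem_pyRange_one] at hj
      rw [PySem.List.pyGetD_map_pyRange_of_nonneg (h0 := hj.1) (h1 := hj.2)]
      unfold pvRow
      rw [PySem.List.pyGetD_map_pyRange_of_nonneg (h0 := by positivity) (h1 := hms)]
      rw [mul_comm]
    rw [hmirror,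
        pvTail (m : Int) size (size - (m : Int)).toNat (m : Int) _ (by omega)]
    unfold pvRow
    rw [PySem.List.pyRange_one_append 0 (m : Int) size (by positivity) (le_of_lt hms),
        List.map_append]

-- ===== VERDICT (by name: the statement is the Claim_ definition above) =====
theorem memory_intensive_operation_spec : Claim_equal_memory_intensive_operation := by
  intro size _
  unfold Spec_memory_intensive_operation
  rw [pvA_eq_map]
  unfold memory_intensive_operation_alt
  by_cases hpos : 0 < size
  · have hcast : ((size.toNat : Nat) : Int) = size := Int.toNat_of_nonneg (le_of_lt hpos)
    have h2 := pvOuter size size.toNat (by rw [hcast])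
    rw [hcast] at h2
    exact h2.symm
  · rw [PySem.List.pyRange_one_eq_nil (h := by omega)]
    simp
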